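-- pv_equiv track=rewrite | github.com/tannybrown/Algorithm-practice | 멀리 뛰기.py | solution
-- ===== SOURCE A (Python) =====
-- import operator as op
-- from functools import reduce
--
-- def solution(n):
--     one = n
--     two = 0
--     ans = 0
--     if n == 1 :
--         return 1
--
--     def nCr(n, r):
--         # if n < 1 or r < 0 or n < r:
--         #     raise ValueError
--         r = min(r, n-r)
--         numerator = reduce(op.mul, range(n, n-r, -1), 1)
--         denominator = reduce(op.mul, range(1, r+1), 1)
--         return numerator // denominator
--
--     while 1 :
--         if one == 0 :
--             return (ans + 1)% 1234567
--         elif one == 1 :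
--             return (ans + two + 1)% 1234567
--         else :
--             ans += nCr(one+two,one)
--
--             one -= 2
--             two += 1
-- ===== SOURCE B (Python) =====
-- def solution(n):
--     a, b = 1, 1
--     for _ in range(n):
--         a, b = b, (a + b) % 1234567
--     return a
-- ===== Notes on version B (the rewrite author's own statement) =====
-- stated objective: faster
-- what changed: Replaced the loop that sums binomial coefficients C(n-k,k) (each computed by multiplying out numerator and denominator products) with a single O(n) iterative Fibonacci pair update taken mod 1234567 at each step; Pre_ excludes n < 0, where A's while loop never terminates.
import Mathlib
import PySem

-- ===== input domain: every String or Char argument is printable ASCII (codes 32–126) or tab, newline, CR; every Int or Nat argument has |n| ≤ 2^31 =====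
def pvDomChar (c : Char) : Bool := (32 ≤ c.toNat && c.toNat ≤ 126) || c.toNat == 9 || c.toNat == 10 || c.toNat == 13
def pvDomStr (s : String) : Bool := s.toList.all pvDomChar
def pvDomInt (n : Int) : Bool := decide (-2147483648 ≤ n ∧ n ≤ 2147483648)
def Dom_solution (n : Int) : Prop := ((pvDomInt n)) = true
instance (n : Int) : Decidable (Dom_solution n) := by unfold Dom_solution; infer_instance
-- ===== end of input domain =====

-- B replaces A's summation of binomial coefficients by an iterative Fibonacci pair mod 1234567.

-- ===== PORT A =====
-- A's nested helper nCr(n, r): min with the complement, then explicit numerator /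
-- denominator products over ranges, then integer floor division.
def pvNCr (n r : Int) : Int :=
  let r' := min r (n - r)
  let numerator := (PySem.List.pyRange n (n - r') (-1)).foldl (· * ·) 1
  let denominator := (PySem.List.pyRange 1 (r' + 1) 1).foldl (· * ·) 1
  PySem.Int.floordiv numerator denominator

-- A's 'while 1' loop; fuel n.toNat + 1 suffices for every n ≥ 0 ('one' drops by 2 per
-- iteration); the fuel-out value 0 is only reachable for n < 0, where the Python loop
-- never terminates (excluded by Pre_).
def pvLoopA : Nat → Int → Int → Int → Int
  | 0, _, _, _ => 0
  | fuel + 1, one, two, ans =>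
    if one = 0 then PySem.Int.mod (ans + 1) 1234567
    else if one = 1 then PySem.Int.mod (ans + two + 1) 1234567
    else pvLoopA fuel (one - 2) (two + 1) (ans + pvNCr (one + two) one)

def solution (n : Int) : Int :=
  if n = 1 then 1 else pvLoopA (n.toNat + 1) n 0 0

-- ===== PORT B =====
-- Source B: a, b = 1, 1; for _ in range(n): a, b = b, (a + b) % 1234567; return a
def solution_alt (n : Int) : Int :=
  ((PySem.List.pyRange 0 n 1).foldl
    (fun (p : Int × Int) _ => (p.2, PySem.Int.mod (p.1 + p.2) 1234567)) (1, 1)).1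

-- ===== PRECONDITION & SPEC =====
-- Pre_ excludes n < 0: there A's 'while 1' loop never terminates (A returns no value).
def Pre_solution (n : Int) : Prop := 0 ≤ n
instance (n : Int) : Decidable (Pre_solution n) := by unfold Pre_solution; infer_instance
def pvWitness_solution : Int := (5)

def Spec_solution (n : Int) (out : Int) : Prop := out = solution_alt n
instance (n : Int) (out : Int) : Decidable (Spec_solution n out) := by unfold Spec_solution; infer_instance

-- ===== CLAIM (what is proved, stated in full; the proofs are below) =====
def Claim_equal_solution : Prop := ∀ (n : Int), Dom_solution n → Pre_solution n → Spec_solution n (solution n)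

-- ===== LEMMAS AND PROOFS =====

theorem pv_foldl_mul_eq (l : List Int) (c : Int) : l.foldl (· * ·) c = c * l.prod := by
  induction l generalizing c with
  | nil => simp
  | cons x t ih => simp [List.foldl_cons, ih, List.prod_cons]; ring

theorem pv_den_eq (r : Nat) :
    (PySem.List.pyRange 1 ((r : Int) + 1) 1).foldl (· * ·) 1 = (Nat.factorial r : Int) := by
  induction r with
  | zero => simp [PySem.List.pyRange_one_eq_nil]
  | succ k ih =>
      rw [show ((k + 1 : Nat) : Int) + 1 = ((k : Int) + 1) + 1 by push_cast; ring,
        PySem.List.pyRange_one_succ_right (by omega), List.foldl_append]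
      simp only [List.foldl_cons, List.foldl_nil, ih]
      rw [Nat.factorial_succ]
      push_cast; ring

theorem pv_num_eq (r : Nat) : ∀ N : Nat, r ≤ N →
    (PySem.List.pyRange (N : Int) ((N : Int) - (r : Int)) (-1)).foldl (· * ·) 1
      = (Nat.descFactorial N r : Int) := by
  induction r with
  | zero => intro N _; simp [PySem.List.pyRange_neg_one_eq_nil]
  | succ k ih =>
      intro N h
      obtain ⟨M, rfl⟩ : ∃ M, N = M + 1 := ⟨N - 1, by omega⟩
      rw [PySem.List.pyRange_neg_one_cons (by push_cast; omega), List.foldl_cons,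
        pv_foldl_mul_eq,
        show ((M + 1 : Nat) : Int) - 1 = (M : Int) by push_cast; ring,
        show ((M + 1 : Nat) : Int) - ((k + 1 : Nat) : Int) = (M : Int) - (k : Int) by push_cast; ring]
      have ih' := ih M (by omega)
      rw [pv_foldl_mul_eq, one_mul] at ih'
      rw [ih', Nat.succ_descFactorial_succ]
      push_cast; ring

theorem pvNCr_eq (a b : Nat) :
    pvNCr ((a : Int) + (b : Int)) (a : Int) = (Nat.choose (a + b) a : Int) := by
  unfold pvNCr
  have h1 : (a : Int) + (b : Int) - (a : Int) = (b : Int) := by ring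
  have h2 : min (a : Int) (b : Int) = ((min a b : Nat) : Int) := by
    rw [Nat.cast_min]
  have h3 : (a : Int) + (b : Int) = ((a + b : Nat) : Int) := by push_cast; ring
  simp only [h1, h2]
  rw [h3]
  rw [pv_num_eq (min a b) (a + b) (by omega), pv_den_eq (min a b),
    PySem.Int.floordiv_natCast, ← Nat.choose_eq_descFactorial_div_factorial]
  rcases Nat.le_total a b with h | h
  · rw [min_eq_left h]
  · have hs := Nat.choose_symm (show a ≤ a + b by omega)
    rw [Nat.add_sub_cancel_left] at hs
    rw [min_eq_right h, hs]

-- the exact value A's loop accumulates, as a Nat-valued recursion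
def pvT : Nat → Nat → Nat
  | 0, _ => 1
  | 1, t => t + 1
  | m + 2, t => Nat.choose (m + 2 + t) (m + 2) + pvT m (t + 1)

theorem pvLoopA_eq (f : Nat) : ∀ (m t : Nat) (ans : Int), m < 2 * f →
    pvLoopA f (m : Int) (t : Int) ans = PySem.Int.mod (ans + (pvT m t : Int)) 1234567 := by
  induction f with
  | zero => intro m t ans h; omega
  | succ f ih =>
      intro m t ans h
      match m with
      | 0 => simp [pvLoopA, pvT]
      | 1 => simp [pvLoopA, pvT]; ring_nf
      | m + 2 =>
          rw [show ((m + 2 : Nat) : Int) = (m : Int) + 2 by push_cast; ring]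
          simp only [pvLoopA, if_neg (by omega : ¬((m : Int) + 2 = 0)),
            if_neg (by omega : ¬((m : Int) + 2 = 1))]
          rw [show (m : Int) + 2 - 2 = (m : Int) by ring,
            show (m : Int) + 2 + (t : Int) = ((m + 2 : Nat) : Int) + (t : Int) by push_cast; ring,
            show (t : Int) + 1 = ((t + 1 : Nat) : Int) by push_cast; ring,
            show (m : Int) + 2 = ((m + 2 : Nat) : Int) by push_cast; ring,
            pvNCr_eq (m + 2) t, ih m (t + 1) _ (by omega)]
          rw [show pvT (m + 2) t = Nat.choose (m + 2 + t) (m + 2) + pvT m (t + 1) from rfl]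
          push_cast; ring_nf

theorem pvT_eq_sum (m : Nat) : ∀ t : Nat,
    pvT m t = ∑ j ∈ Finset.range (m / 2 + 1), Nat.choose (m + t - j) (m - 2 * j) := by
  induction m using Nat.strong_induction_on with
  | _ m ih =>
    match m with
    | 0 => intro t; simp [pvT]
    | 1 => intro t; simp [pvT]; omega
    | m + 2 =>
        intro t
        rw [show pvT (m + 2) t = Nat.choose (m + 2 + t) (m + 2) + pvT m (t + 1) from rfl,
          ih m (by omega) (t + 1),
          show (m + 2) / 2 + 1 = (m / 2 + 1) + 1 by omega,
          Finset.sum_range_succ' (fun j => Nat.choose (m + 2 + t - j) (m + 2 - 2 * j)) (m / 2 + 1),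
          add_comm (∑ _k ∈ Finset.range (m / 2 + 1), _)]
        congr 1
        refine Finset.sum_congr rfl (fun j hj => ?_)
        have hj' : j ≤ m / 2 := by simpa [Nat.lt_succ_iff] using hj
        congr 1 <;> omega

theorem pv_sum_eq_fib (m : Nat) :
    ∑ j ∈ Finset.range (m / 2 + 1), Nat.choose (m - j) (m - 2 * j) = Nat.fib (m + 1) := by
  have hfib : Nat.fib (m + 1) = ∑ j ∈ Finset.range (m + 1), Nat.choose (m - j) j := by
    rw [Nat.fib_succ_eq_sum_choose, Finset.Nat.sum_antidiagonal_eq_sum_range_succ_mk,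
      ← Finset.sum_range_reflect (fun k => Nat.choose k (m - k)) (m + 1)]
    exact Finset.sum_congr rfl (fun j hj => by
      simp only [Finset.mem_range] at hj
      congr 1
      omega)
  calc ∑ j ∈ Finset.range (m / 2 + 1), Nat.choose (m - j) (m - 2 * j)
      = ∑ j ∈ Finset.range (m / 2 + 1), Nat.choose (m - j) j := by
        refine Finset.sum_congr rfl (fun j hj => ?_)
        simp only [Finset.mem_range] at hj
        have hs := Nat.choose_symm (show j ≤ m - j by omega)
        rw [show m - j - j = m - 2 * j by omega] at hs
        exact hs
    _ = ∑ j ∈ Finset.range (m + 1), Nat.choose (m - j) j := by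
        refine Finset.sum_subset (by intro x hx; simp only [Finset.mem_range] at *; omega)
          (fun j hj hj2 => Nat.choose_eq_zero_of_lt (by
            simp only [Finset.mem_range] at hj hj2; omega))
    _ = Nat.fib (m + 1) := hfib.symm

theorem pv_fold_fib (m : Nat) : ∀ (l : List Int), l.length = m → ∀ k : Nat,
    l.foldl (fun (p : Int × Int) _ => (p.2, PySem.Int.mod (p.1 + p.2) 1234567))
      (((Nat.fib (k + 1) % 1234567 : Nat) : Int), ((Nat.fib (k + 2) % 1234567 : Nat) : Int))
      = (((Nat.fib (m + k + 1) % 1234567 : Nat) : Int), ((Nat.fib (m + k + 2) % 1234567 : Nat) : Int)) := by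
  induction m with
  | zero => intro l hl k; simp [List.length_eq_zero_iff.mp hl]
  | succ m ih =>
      intro l hl k
      match l with
      | x :: t =>
          simp only [List.foldl_cons]
          have hkey : Nat.fib (k + 3) = Nat.fib (k + 1) + Nat.fib (k + 2) := by
            rw [show k + 3 = (k + 1) + 2 from by omega, Nat.fib_add_two,
              show (k + 1) + 1 = k + 2 from by omega]
          have : PySem.Int.mod (((Nat.fib (k + 1) % 1234567 : Nat) : Int) + ((Nat.fib (k + 2) % 1234567 : Nat) : Int)) 1234567
              = ((Nat.fib (k + 3) % 1234567 : Nat) : Int) := by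
            rw [show ((Nat.fib (k + 1) % 1234567 : Nat) : Int) + ((Nat.fib (k + 2) % 1234567 : Nat) : Int)
                = ((Nat.fib (k + 1) % 1234567 + Nat.fib (k + 2) % 1234567 : Nat) : Int) by push_cast; ring,
              show (1234567 : Int) = ((1234567 : Nat) : Int) by norm_num,
              PySem.Int.mod_natCast, ← Nat.add_mod, hkey]
          rw [this]
          have ht := ih t (by simpa using hl) (k + 1)
          rw [show k + 1 + 1 = k + 2 by ring, show k + 1 + 2 = k + 3 by ring] at ht
          rw [show m + 1 + k + 1 = m + (k + 1) + 1 from by omega,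
            show m + 1 + k + 2 = m + (k + 1) + 2 from by omega]
          exact ht

theorem pv_alt_eq (m : Nat) :
    solution_alt (m : Int) = ((Nat.fib (m + 1) % 1234567 : Nat) : Int) := by
  unfold solution_alt
  have hlen : (PySem.List.pyRange 0 (m : Int) 1).length = m := by
    rw [PySem.List.length_pyRange_one]; omega
  have h0 : ((1 : Int), (1 : Int))
      = (((Nat.fib (0 + 1) % 1234567 : Nat) : Int), ((Nat.fib (0 + 2) % 1234567 : Nat) : Int)) := by
    norm_num
  rw [h0, pv_fold_fib m _ hlen 0]

theorem pv_main (n : Int) (h : 0 ≤ n) : solution n = solution_alt n := by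
  obtain ⟨m, rfl⟩ : ∃ m : Nat, n = (m : Int) := ⟨n.toNat, (Int.toNat_of_nonneg h).symm⟩
  rw [pv_alt_eq]
  unfold solution
  by_cases hm : (m : Int) = 1
  · rw [if_pos hm]
    have : m = 1 := by omega
    subst this
    norm_num
  · rw [if_neg hm]
    rw [show ((m : Int)).toNat = m from Int.toNat_natCast m,
      show (0 : Int) = ((0 : Nat) : Int) from rfl,
      pvLoopA_eq (m + 1) m 0 (((0 : Nat) : Int)) (by omega)]
    simp only [Nat.cast_zero]
    rw [pvT_eq_sum m 0]
    simp only [Nat.add_zero]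
    rw [pv_sum_eq_fib m, zero_add,
      show (1234567 : Int) = ((1234567 : Nat) : Int) by norm_num,
      PySem.Int.mod_natCast]

-- ===== VERDICT (by name: the statement is the Claim_ definition above) =====
theorem solution_spec : Claim_equal_solution := by
  intro n _ hpre
  unfold Spec_solution
  exact pv_main n hpre
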